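-- pv_equiv track=rewrite | github.com/saeye/algorithm | codekata/codekata_no31-no33.py | solution
-- ===== SOURCE A (Python) =====
-- def solution(left, right):
--     left_divisor = []
--     right_divisor = []
--     left_divisor = [i for i in range(left+1) if i % 2 == 0]
--     right_divisor = [i for i in range(right+1) if i % 2 == 1]
--     len(left_divisor)
--     len(right_divisor)
--     return sum(int(i) if i % 2 == 0 else -int(i) for i in range(left, right+1))
-- ===== SOURCE B (Python) =====
-- def solution(left, right):
--     # closed form via prefix sums: O(1) instead of A's O(right) scan
--     def prefix(n):
--         # sum of (i if i even else -i) for i in 0..n, extended to n < 0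
--         # by the odd symmetry of the summand so that the answer below holds
--         m = n if n >= 0 else -n - 1
--         return m // 2 if m % 2 == 0 else -(m + 1) // 2
--     if left > right:
--         return 0
--     return prefix(right) - prefix(left - 1)
-- ===== Notes on version B (the rewrite author's own statement) =====
-- stated objective: faster
-- what changed: Replaces A's linear scan of range(left, right+1) (plus two unused list comprehensions) with an O(1) closed-form prefix-sum formula for the alternating sum.
import Mathlib
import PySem

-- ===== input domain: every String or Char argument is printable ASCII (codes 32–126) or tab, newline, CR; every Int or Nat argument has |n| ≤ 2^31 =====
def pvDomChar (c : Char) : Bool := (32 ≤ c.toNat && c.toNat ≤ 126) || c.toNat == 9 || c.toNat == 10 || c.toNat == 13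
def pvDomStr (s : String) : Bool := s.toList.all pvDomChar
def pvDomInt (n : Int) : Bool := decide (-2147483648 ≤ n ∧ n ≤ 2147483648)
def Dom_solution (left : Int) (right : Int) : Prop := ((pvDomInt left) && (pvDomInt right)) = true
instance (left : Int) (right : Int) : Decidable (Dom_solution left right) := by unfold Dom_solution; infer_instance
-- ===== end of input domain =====

-- B replaces A's linear scan (and its two unused even/odd comprehensions) by an
-- O(1) closed-form prefix-sum formula; faster (asymptotic).


-- ===== PORT A =====
def solution (left : Int) (right : Int) : Int :=
  let left_divisor : List Int := []
  let right_divisor : List Int := []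
  let left_divisor := (PySem.List.pyRange 0 (left + 1) 1).filter (fun i => PySem.Int.mod i 2 == 0)
  let right_divisor := (PySem.List.pyRange 0 (right + 1) 1).filter (fun i => PySem.Int.mod i 2 == 1)
  let _ := left_divisor.length
  let _ := right_divisor.length
  (PySem.List.pyRange left (right + 1) 1).foldl
    (fun acc i => acc + (if PySem.Int.mod i 2 == 0 then i else -i)) 0

-- ===== PORT B =====
-- prefix n = sum of (i if i even else -i) for i in 0..n, extended to n < 0 by odd symmetry
def prefixAlt (n : Int) : Int :=
  let m := if n ≥ 0 then n else -n - 1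
  if PySem.Int.mod m 2 == 0 then PySem.Int.floordiv m 2
  else PySem.Int.floordiv (-(m + 1)) 2

def solution_alt (left : Int) (right : Int) : Int :=
  if left > right then 0
  else prefixAlt right - prefixAlt (left - 1)

-- ===== PRECONDITION & SPEC =====
def Spec_solution (left : Int) (right : Int) (out : Int) : Prop := out = solution_alt left right
instance (left : Int) (right : Int) (out : Int) : Decidable (Spec_solution left right out) := by unfold Spec_solution; infer_instance

-- ===== CLAIM (what is proved, stated in full; the proofs are below) =====
def Claim_equal_solution : Prop := ∀ (left : Int) (right : Int), Dom_solution left right → Spec_solution left right (solution left right)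

-- ===== LEMMAS AND PROOFS =====

theorem prefixAlt_eq (n : Int) :
    prefixAlt n = (if (if n ≥ 0 then n else -n - 1) % 2 = 0
                   then (if n ≥ 0 then n else -n - 1) / 2
                   else (-((if n ≥ 0 then n else -n - 1) + 1)) / 2) := by
  show (if PySem.Int.mod (if n ≥ 0 then n else -n - 1) 2 == 0
        then PySem.Int.floordiv (if n ≥ 0 then n else -n - 1) 2
        else PySem.Int.floordiv (-((if n ≥ 0 then n else -n - 1) + 1)) 2) = _
  rw [PySem.Int.mod_eq_emod_of_pos (a := if n ≥ 0 then n else -n - 1) (by norm_num),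
      PySem.Int.floordiv_eq_ediv_of_pos (a := if n ≥ 0 then n else -n - 1) (by norm_num),
      PySem.Int.floordiv_eq_ediv_of_pos (a := -((if n ≥ 0 then n else -n - 1) + 1)) (by norm_num)]
  simp only [beq_iff_eq]

theorem prefixAlt_step (b : Int) :
    prefixAlt b = prefixAlt (b - 1) + (if PySem.Int.mod b 2 == 0 then b else -b) := by
  rw [PySem.Int.mod_eq_emod_of_pos (a := b) (by norm_num), prefixAlt_eq, prefixAlt_eq]
  simp only [beq_iff_eq]
  split_ifs <;> omega

theorem foldl_acc_shift (l : List Int) (f : Int → Int) (a : Int) :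
    l.foldl (fun acc i => acc + f i) a = a + l.foldl (fun acc i => acc + f i) 0 := by
  induction l generalizing a with
  | nil => simp
  | cons x xs ih => simp only [List.foldl_cons]; rw [ih, ih (0 + f x)]; ring

theorem sum_range_closed (a b : Int) (h : a ≤ b) :
    (PySem.List.pyRange a b 1).foldl
      (fun acc i => acc + (if PySem.Int.mod i 2 == 0 then i else -i)) 0
      = prefixAlt (b - 1) - prefixAlt (a - 1) := by
  have hn : (b - a).toNat = (b - a).toNat := rfl
  induction hk : (b - a).toNat generalizing b with
  | zero =>
    have hb : b = a := by omega
    subst hb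
    rw [PySem.List.pyRange_one_eq_nil le_rfl]
    simp
  | succ k ih =>
    have hab : a ≤ b - 1 := by omega
    have : b = (b - 1) + 1 := by ring
    rw [this, PySem.List.pyRange_one_succ_right hab, List.foldl_append]
    simp only [List.foldl_cons, List.foldl_nil]
    rw [foldl_acc_shift _ (fun i => if PySem.Int.mod i 2 == 0 then i else -i),
        ih (b - 1) hab (by omega)]
    rw [prefixAlt_step (b - 1 + 1 - 1)]
    ring_nf
    omega

-- ===== VERDICT (by name: the statement is the Claim_ definition above) =====
theorem solution_eq_foldl (left right : Int) :
    solution left right = (PySem.List.pyRange left (right + 1) 1).foldl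
      (fun acc i => acc + (if PySem.Int.mod i 2 == 0 then i else -i)) 0 := rfl

theorem solution_spec : Claim_equal_solution := by
  intro left right _
  unfold Spec_solution solution_alt
  rw [solution_eq_foldl]
  by_cases h : left > right
  · rw [PySem.List.pyRange_one_eq_nil (by omega)]
    simp [h]
  · rw [sum_range_closed left (right + 1) (by omega)]
    simp [h]
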